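-- pv_equiv track=rewrite | github.com/Au-ust/tech-stack-agent | src/tools/search.py | prioritize_official_sources
-- ===== SOURCE A (Python) =====
-- from typing import List, Dict, Any, Optional
--
-- def prioritize_official_sources(
--
--     results: List[Dict[str, Any]],
-- ) -> List[Dict[str, Any]]:
--     """
--     Prioritize official documentation and reputable tech sites.
--
--     Args:
--         results: Search results to prioritize
--
--     Returns:
--         Sorted search results with official sources first
--     """
--     official_domains = [
--         'github.com',
--         'npmjs.com',
--         'reactjs.org',
--         'vuejs.org',
--         'angular.io',
--         'svelte.dev',
--         'nextjs.org',
--         'dev.to',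
--         'medium.com',
--         'stackoverflow.com',
--         'mdn.mozilla.org',
--     ]
--
--     def priority_score(result: Dict[str, Any]) -> int:
--         href = result.get('href', '').lower()
--
--         # Official sources get highest priority
--         for domain in official_domains:
--             if domain in href:
--                 return 10
--
--         # Default priority
--         return 0
--
--     # Sort by priority (descending)
--     return sorted(results, key=priority_score, reverse=True)
-- ===== SOURCE B (Python) =====
-- OFFICIAL_DOMAINS = (
--     'github.com',
--     'npmjs.com',
--     'reactjs.org',
--     'vuejs.org',
--     'angular.io',
--     'svelte.dev',
--     'nextjs.org',
--     'dev.to',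
--     'medium.com',
--     'stackoverflow.com',
--     'mdn.mozilla.org',
-- )
--
--
-- def _is_official(result):
--     href = result.get('href', '').lower()
--     return any(domain in href for domain in OFFICIAL_DOMAINS)
--
--
-- def prioritize_official_sources(results):
--     """Put results from official/reputable domains first, keeping input order
--     within each group (stable two-bucket partition, no sort)."""
--     official = []
--     others = []
--     for result in results:
--         if _is_official(result):
--             official.append(result)
--         else:
--             others.append(result)
--     return official + others
-- ===== Notes on version B (the rewrite author's own statement) =====
-- stated objective: simpler
-- what changed: Replaces the stable reverse sort by a two-valued priority key with a single-pass stable partition into an 'official' bucket and an 'others' bucket, concatenated; equivalent because Python's sorted is stable and the key takes only two values.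
import Mathlib
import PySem

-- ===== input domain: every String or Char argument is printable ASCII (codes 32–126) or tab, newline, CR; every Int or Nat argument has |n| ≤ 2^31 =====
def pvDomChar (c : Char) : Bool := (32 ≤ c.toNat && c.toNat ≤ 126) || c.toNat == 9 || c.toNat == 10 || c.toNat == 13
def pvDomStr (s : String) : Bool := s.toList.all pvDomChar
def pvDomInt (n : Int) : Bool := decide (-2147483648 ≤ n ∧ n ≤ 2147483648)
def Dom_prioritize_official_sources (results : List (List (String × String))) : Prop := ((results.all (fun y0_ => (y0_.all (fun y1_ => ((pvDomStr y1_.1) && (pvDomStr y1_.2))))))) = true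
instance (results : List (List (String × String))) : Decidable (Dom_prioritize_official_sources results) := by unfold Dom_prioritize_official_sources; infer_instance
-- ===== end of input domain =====

-- ===== PORT A =====
-- B changes: single-pass stable partition into official/others buckets instead of a stable reverse sort by a two-valued key (simpler).
def officialDomainsA : List String :=
  ["github.com", "npmjs.com", "reactjs.org", "vuejs.org", "angular.io", "svelte.dev",
   "nextjs.org", "dev.to", "medium.com", "stackoverflow.com", "mdn.mozilla.org"]

-- the 'for domain in official_domains: if domain in href: return 10' loop
def priorityLoop (domains : List String) (href : String) : Int :=
  match domains with
  | [] => 0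
  | d :: ds => if PySem.Str.isIn d href then 10 else priorityLoop ds href

def priorityScore (result : List (String × String)) : Int :=
  let href := PySem.Str.lower ((PySem.Dict.mk result).getD "href" "")
  priorityLoop officialDomainsA href

def prioritize_official_sources (results : List (List (String × String))) : List (List (String × String)) :=
  PySem.List.sorted results priorityScore true

-- ===== PORT B =====
def officialDomainsB : List String :=
  ["github.com", "npmjs.com", "reactjs.org", "vuejs.org", "angular.io", "svelte.dev",
   "nextjs.org", "dev.to", "medium.com", "stackoverflow.com", "mdn.mozilla.org"]

def isOfficial (result : List (String × String)) : Bool :=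
  let href := PySem.Str.lower ((PySem.Dict.mk result).getD "href" "")
  officialDomainsB.any (fun d => PySem.Str.isIn d href)

def prioritize_official_sources_alt (results : List (List (String × String))) : List (List (String × String)) :=
  let buckets := results.foldl
    (fun (acc : List (List (String × String)) × List (List (String × String))) r =>
      if isOfficial r then (acc.1 ++ [r], acc.2) else (acc.1, acc.2 ++ [r]))
    ([], [])
  buckets.1 ++ buckets.2

-- ===== PRECONDITION & SPEC =====
def Spec_prioritize_official_sources (results : List (List (String × String))) (out : List (List (String × String))) : Prop := out = prioritize_official_sources_alt results
instance (results : List (List (String × String))) (out : List (List (String × String))) : Decidable (Spec_prioritize_official_sources results out) := by unfold Spec_prioritize_official_sources; infer_instance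

-- ===== CLAIM (what is proved, stated in full; the proofs are below) =====
def Claim_equal_prioritize_official_sources : Prop := ∀ (results : List (List (String × String))), Dom_prioritize_official_sources results → Spec_prioritize_official_sources results (prioritize_official_sources results)

-- ===== LEMMAS AND PROOFS =====

-- A's early-return loop equals B's any-of-substrings test
theorem priorityLoop_eq_any (domains : List String) (href : String) :
    priorityLoop domains href = if domains.any (fun d => PySem.Str.isIn d href) then 10 else 0 := by
  induction domains with
  | nil => simp [priorityLoop]
  | cons d ds ih =>
    simp only [priorityLoop, ih]
    by_cases h : PySem.Chars.isIn d.toList href.toList <;> simp [h]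

theorem priorityScore_eq (r : List (String × String)) :
    priorityScore r = if isOfficial r then 10 else 0 := by
  simp [priorityScore, isOfficial, officialDomainsA, officialDomainsB, priorityLoop_eq_any]

theorem insertBy_skip {α : Type} (before : α → α → Bool) (x : α) (off non : List α)
    (h : ∀ y ∈ off, before x y = false) :
    PySem.List.insertBy before x (off ++ non) = off ++ PySem.List.insertBy before x non := by
  induction off with
  | nil => simp
  | cons a as ih =>
    have ha : before x a = false := h a (by simp)
    simp only [List.cons_append, PySem.List.insertBy, ha]
    simp [ih (fun y hy => h y (by simp [hy]))]

theorem insertBy_front {α : Type} (before : α → α → Bool) (x : α) (non : List α)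
    (h : ∀ y ∈ non, before x y = true) :
    PySem.List.insertBy before x non = x :: non := by
  cases non with
  | nil => simp [PySem.List.insertBy]
  | cons a as => simp [PySem.List.insertBy, h a (by simp)]

-- the insertion-sort loop of A's reverse sort maintains 'official block, then others block'
theorem foldl_insertBy_partition {α : Type} (p : α → Bool)
    (xs off non : List α)
    (hoff : ∀ y ∈ off, p y = true) (hnon : ∀ y ∈ non, p y = false) :
    xs.foldl (fun acc x =>
        PySem.List.insertBy
          (fun a b => decide ((if p b then (10:Int) else 0) < (if p a then (10:Int) else 0))) x acc)
      (off ++ non)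
    = (off ++ xs.filter p) ++ (non ++ xs.filter (fun x => !p x)) := by
  induction xs generalizing off non with
  | nil => simp
  | cons x xs ih =>
    by_cases hp : p x
    · have hstep : PySem.List.insertBy
          (fun a b => decide ((if p b then (10:Int) else 0) < (if p a then (10:Int) else 0))) x (off ++ non)
          = (off ++ [x]) ++ non := by
        rw [insertBy_skip _ _ _ _ (fun y hy => by simp [hp, hoff y hy])]
        rw [insertBy_front _ _ _ (fun y hy => by simp [hp, hnon y hy])]
        simp
      rw [List.foldl_cons, hstep,
        ih (off ++ [x]) non
          (by intro y hy; rcases List.mem_append.mp hy with h | h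
              · exact hoff y h
              · simp at h; simpa [h] using hp)
          hnon]
      simp [hp]
    · have hstep : PySem.List.insertBy
          (fun a b => decide ((if p b then (10:Int) else 0) < (if p a then (10:Int) else 0))) x (off ++ non)
          = off ++ (non ++ [x]) := by
        rw [PySem.List.insertBy_of_forall_not_before]
        · simp
        · intro y _; by_cases hy : p y <;> simp [hp, hy]
      rw [List.foldl_cons, hstep,
        ih off (non ++ [x]) hoff
          (by intro y hy; rcases List.mem_append.mp hy with h | h
              · exact hnon y h
              · simp at h; subst h; simpa using hp)]
      simp [hp]

-- B's pair-accumulator loop is the pair of filters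
theorem foldl_buckets {α : Type} (q : α → Bool) (xs : List α) (a b : List α) :
    xs.foldl (fun (acc : List α × List α) r =>
        if q r then (acc.1 ++ [r], acc.2) else (acc.1, acc.2 ++ [r])) (a, b)
    = (a ++ xs.filter q, b ++ xs.filter (fun x => !q x)) := by
  induction xs generalizing a b with
  | nil => simp
  | cons x xs ih =>
    by_cases hq : q x <;> simp [hq, ih]

-- ===== VERDICT (by name: the statement is the Claim_ definition above) =====
theorem prioritize_official_sources_spec : Claim_equal_prioritize_official_sources := by
  intro results _
  show prioritize_official_sources results = prioritize_official_sources_alt results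
  unfold prioritize_official_sources prioritize_official_sources_alt
  rw [PySem.List.sorted_rev_eq_foldl_insertBy,
    show priorityScore = fun r => if isOfficial r then (10:Int) else 0 from funext priorityScore_eq]
  have h1 := foldl_insertBy_partition isOfficial results [] [] (by simp) (by simp)
  have h2 := foldl_buckets isOfficial results [] []
  simp only [List.nil_append] at h1 h2
  simp [h1, h2]
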